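-- pv_equiv track=rewrite | github.com/onito/hello_python | day20_0311_pickled_diary.py | add_dict_to_dict
-- ===== SOURCE A (Python) =====
-- def add_dict_to_dict(dict_a, dict_b):           # [OUT]: dict_a, overwrapped
--     overwrapped = 0
--     for key in dict_b:
--         if key in dict_a.keys():
--             overwrapped += 1
--         else:
--             dict_a[key] = dict_b[key]
--     return dict_a, overwrapped
-- ===== SOURCE B (Python) =====
-- def add_dict_to_dict(dict_a, dict_b):           # [OUT]: dict_a, overwrapped
--     before = len(dict_a)
--     dict_a |= dict_b | dict_a
--     return dict_a, before + len(dict_b) - len(dict_a)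
-- ===== Notes on version B (the rewrite author's own statement) =====
-- stated objective: alternative
-- what changed: B has no loop and no per-key membership test: it merges with dict union operators (dict_a |= dict_b | dict_a, which keeps dict_a's values and appends new keys in dict_b's order) and recovers the overlap count by inclusion-exclusion on dict sizes (len_a_before + len_b - len_after).
import Mathlib
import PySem

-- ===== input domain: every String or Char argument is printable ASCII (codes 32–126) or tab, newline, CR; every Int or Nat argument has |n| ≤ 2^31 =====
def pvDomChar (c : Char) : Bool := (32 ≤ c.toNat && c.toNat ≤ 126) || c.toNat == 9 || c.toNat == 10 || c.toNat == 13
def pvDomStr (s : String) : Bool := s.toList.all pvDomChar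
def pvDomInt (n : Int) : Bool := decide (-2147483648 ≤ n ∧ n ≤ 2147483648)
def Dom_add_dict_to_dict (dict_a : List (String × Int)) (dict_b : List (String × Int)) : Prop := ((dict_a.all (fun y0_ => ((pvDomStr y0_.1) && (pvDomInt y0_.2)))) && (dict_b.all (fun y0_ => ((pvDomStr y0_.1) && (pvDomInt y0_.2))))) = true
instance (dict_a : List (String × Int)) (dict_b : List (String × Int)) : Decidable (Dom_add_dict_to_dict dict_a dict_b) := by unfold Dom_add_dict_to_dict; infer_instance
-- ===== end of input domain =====

-- B merges with dict union operators (dict_a |= dict_b | dict_a) and gets the overlap count by inclusion-exclusion on sizes, instead of A's per-key membership loop; like A, B mutates dict_a in place — the equivalence proved is about the return value.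


-- ===== PORT A =====
def add_dict_to_dict (dict_a : List (String × Int)) (dict_b : List (String × Int)) : (List (String × Int)) × Int :=
  let da := PySem.Dict.ofList dict_a
  let db := PySem.Dict.ofList dict_b
  -- overwrapped = 0; for key in dict_b: if key in dict_a.keys(): overwrapped += 1 else: dict_a[key] = dict_b[key]
  let r := db.keys.foldl (fun (acc : PySem.Dict String Int × Int) key =>
      if acc.1.contains key then (acc.1, acc.2 + 1)
      else (acc.1.insert key (db.getD key 0), acc.2)) (da, 0)
  (r.1.items, r.2)

-- ===== PORT B =====
def add_dict_to_dict_alt (dict_a : List (String × Int)) (dict_b : List (String × Int)) : (List (String × Int)) × Int :=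
  let da := PySem.Dict.ofList dict_a
  let db := PySem.Dict.ofList dict_b
  -- before = len(dict_a)
  let before : Int := da.size
  -- dict_a |= dict_b | dict_a   ('d | e' is a copy of d updated with e's items; '|=' updates in place)
  let merged := PySem.Dict.update da (PySem.Dict.update db da.items).items
  -- return dict_a, before + len(dict_b) - len(dict_a)
  (merged.items, before + (db.size : Int) - (merged.size : Int))

-- ===== PRECONDITION & SPEC =====
def Spec_add_dict_to_dict (dict_a : List (String × Int)) (dict_b : List (String × Int)) (out : (List (String × Int)) × Int) : Prop := out = add_dict_to_dict_alt dict_a dict_b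
instance (dict_a : List (String × Int)) (dict_b : List (String × Int)) (out : (List (String × Int)) × Int) : Decidable (Spec_add_dict_to_dict dict_a dict_b out) := by unfold Spec_add_dict_to_dict; infer_instance

-- ===== CLAIM (what is proved, stated in full; the proofs are below) =====
def Claim_equal_add_dict_to_dict : Prop := ∀ (dict_a : List (String × Int)) (dict_b : List (String × Int)), Dom_add_dict_to_dict dict_a dict_b → Spec_add_dict_to_dict dict_a dict_b (add_dict_to_dict dict_a dict_b)

-- ===== LEMMAS AND PROOFS =====

-- unfolding steps of Dict.update (it is a foldl of inserts)
lemma update_nil (d : PySem.Dict String Int) : d.update [] = d := rfl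

lemma update_cons (d : PySem.Dict String Int) (p : String × Int) (ps : List (String × Int)) :
    d.update (p :: ps) = (d.insert p.1 p.2).update ps := rfl

-- a member pair's key is contained
lemma contains_of_mem_items (d : PySem.Dict String Int) {p : String × Int} (h : p ∈ d.items) :
    d.contains p.1 = true :=
  (PySem.Dict.contains_iff_mem_keys d p.1).mpr (PySem.Dict.mem_keys_of_mem_items d h)

-- re-inserting a key with its current value leaves the dict unchanged
lemma insert_get?_self (d : PySem.Dict String Int) {k : String} {v : Int}
    (hnd : d.keys.Nodup) (h : d.get? k = some v) : d.insert k v = d := by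
  have hc : d.contains k = true := by
    rw [PySem.Dict.contains_eq_isSome_get?, h]; rfl
  apply PySem.Dict.ext
  rw [PySem.Dict.items_insert_of_contains d v hc]
  have hmap : List.map (fun p => if (p.1 == k) = true then (k, v) else p) d.items
      = List.map id d.items := by
    apply List.map_congr_left
    intro p hp
    obtain ⟨a, b⟩ := p
    by_cases hk : a = k
    · subst hk
      have hv : d.get? a = some b := PySem.Dict.get?_of_mem_items d hp hnd
      rw [h] at hv
      have hvb : v = b := Option.some.inj hv
      simp [hvb]
    · simp [hk]
  rw [hmap, List.map_id]

-- A's merge loop: over distinct keys it appends the fresh pairs and counts the overlapping keys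
lemma a_loop (db : PySem.Dict String Int) :
    ∀ (l : List String), l.Nodup → ∀ (d : PySem.Dict String Int) (c : Int),
    l.foldl (fun (acc : PySem.Dict String Int × Int) key =>
        if acc.1.contains key then (acc.1, acc.2 + 1)
        else (acc.1.insert key (db.getD key 0), acc.2)) (d, c)
      = (⟨d.items ++ (l.filter (fun k => !d.contains k)).map (fun k => (k, db.getD k 0))⟩,
         c + ((l.filter (fun k => d.contains k)).length : Int)) := by
  intro l
  induction l with
  | nil => intro _ d c; simp
  | cons k rest ih =>
    intro hnd d c
    have hk : k ∉ rest := (List.nodup_cons.mp hnd).1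
    by_cases h : d.contains k = true
    · rw [List.foldl_cons, if_pos h, ih hnd.of_cons]
      have h1 : List.filter (fun x => !d.contains x) (k :: rest)
          = List.filter (fun x => !d.contains x) rest := by simp [h]
      have h2 : List.filter (fun x => d.contains x) (k :: rest)
          = k :: List.filter (fun x => d.contains x) rest := by simp [h]
      rw [h1, h2, Prod.mk.injEq]
      refine ⟨rfl, ?_⟩
      simp only [List.length_cons]
      push_cast
      ring
    · have h' : d.contains k = false := by simpa using h
      rw [List.foldl_cons, if_neg h, ih hnd.of_cons]
      have hfilc : rest.filter (fun x => (d.insert k (db.getD k 0)).contains x)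
          = rest.filter (fun x => d.contains x) := by
        apply List.filter_congr
        intro x hx
        have hxk : (x == k) = false := by
          simp only [beq_eq_false_iff_ne]; exact fun h0 => hk (h0 ▸ hx)
        rw [PySem.Dict.contains_insert, hxk, Bool.false_or]
      have hfiln : rest.filter (fun x => !(d.insert k (db.getD k 0)).contains x)
          = rest.filter (fun x => !d.contains x) := by
        apply List.filter_congr
        intro x hx
        have hxk : (x == k) = false := by
          simp only [beq_eq_false_iff_ne]; exact fun h0 => hk (h0 ▸ hx)
        rw [PySem.Dict.contains_insert, hxk, Bool.false_or]
      rw [hfilc, hfiln, PySem.Dict.items_insert_of_not_contains d _ h']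
      have h1 : List.filter (fun x => !d.contains x) (k :: rest)
          = k :: List.filter (fun x => !d.contains x) rest := by simp [h']
      have h2 : List.filter (fun x => d.contains x) (k :: rest)
          = List.filter (fun x => d.contains x) rest := by simp [h']
      rw [h1, h2, Prod.mk.injEq]
      refine ⟨congrArg PySem.Dict.mk ?_, rfl⟩
      simp [List.append_assoc]

-- updating with pairs that are already present (same value) or fresh just appends the fresh ones
lemma update_items_of_consistent :
    ∀ (ps : List (String × Int)), (ps.map Prod.fst).Nodup →
    ∀ (d : PySem.Dict String Int), d.keys.Nodup →
    (∀ p ∈ ps, d.get? p.1 = some p.2 ∨ d.contains p.1 = false) →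
    (d.update ps).items = d.items ++ ps.filter (fun p => !d.contains p.1) := by
  intro ps
  induction ps with
  | nil => intro _ d _ _; simp [update_nil]
  | cons p rest ih =>
    intro hnd d hdnd hcons
    have hndr : (rest.map Prod.fst).Nodup := (List.nodup_cons.mp hnd).2
    have hkrest : p.1 ∉ rest.map Prod.fst := (List.nodup_cons.mp hnd).1
    rw [update_cons]
    rcases hcons p (List.mem_cons_self) with hsame | hfresh
    · -- key already present with the same value: the insert is a no-op
      have hc : d.contains p.1 = true := by
        rw [PySem.Dict.contains_eq_isSome_get?, hsame]; rfl
      rw [insert_get?_self d hdnd hsame]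
      rw [ih hndr d hdnd (fun q hq => hcons q (List.mem_cons_of_mem _ hq))]
      simp [hc]
    · -- fresh key: appended
      have hnd' : (d.insert p.1 p.2).keys.Nodup := PySem.Dict.nodup_keys_insert d p.1 p.2 hdnd
      have hcons' : ∀ q ∈ rest, (d.insert p.1 p.2).get? q.1 = some q.2 ∨
          (d.insert p.1 p.2).contains q.1 = false := by
        intro q hq
        have hqk : q.1 ≠ p.1 := fun h0 => hkrest (h0 ▸ List.mem_map_of_mem hq)
        rcases hcons q (List.mem_cons_of_mem _ hq) with h1 | h2
        · exact Or.inl (by rw [PySem.Dict.get?_insert_of_ne d p.2 hqk, h1])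
        · refine Or.inr ?_
          rw [PySem.Dict.contains_insert, h2]
          simp [hqk]
      rw [ih hndr _ hnd' hcons', PySem.Dict.items_insert_of_not_contains d p.2 hfresh]
      have hfil : rest.filter (fun q => !(d.insert p.1 p.2).contains q.1)
          = rest.filter (fun q => !d.contains q.1) := by
        apply List.filter_congr
        intro q hq
        have hqk : (q.1 == p.1) = false := by
          simp only [beq_eq_false_iff_ne]
          exact fun h0 => hkrest (h0 ▸ List.mem_map_of_mem hq)
        rw [PySem.Dict.contains_insert, hqk, Bool.false_or]
      rw [hfil]
      have h1 : List.filter (fun q => !d.contains q.1) (p :: rest)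
          = p :: List.filter (fun q => !d.contains q.1) rest := by
        simp [hfresh]
      rw [h1]
      simp [List.append_assoc]

-- updating with pairs whose keys all fail a key-predicate does not change the filtered items
lemma filter_items_update (Q : String → Bool) :
    ∀ (ps : List (String × Int)), (∀ p ∈ ps, Q p.1 = false) →
    ∀ (d : PySem.Dict String Int),
    ((d.update ps).items.filter (fun p => Q p.1)) = d.items.filter (fun p => Q p.1) := by
  intro ps
  induction ps with
  | nil => intro _ d; simp [update_nil]
  | cons p rest ih =>
    intro hQ d
    rw [update_cons, ih (fun q hq => hQ q (List.mem_cons_of_mem _ hq))]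
    have hQp : Q p.1 = false := hQ p List.mem_cons_self
    by_cases hc : d.contains p.1 = true
    · rw [PySem.Dict.items_insert_of_contains d p.2 hc, List.filter_map]
      have hpred : ((fun q : String × Int => Q q.1) ∘
          (fun q : String × Int => if (q.1 == p.1) = true then (p.1, p.2) else q))
          = (fun q : String × Int => Q q.1) := by
        funext q
        by_cases hq : (q.1 == p.1) = true
        · simp only [Function.comp, hq, if_true]
          rw [show q.1 = p.1 from by simpa using hq, hQp]
        · simp [Function.comp, hq]
      rw [hpred]
      have hmap : List.map (fun q => if (q.1 == p.1) = true then (p.1, p.2) else q)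
          (d.items.filter (fun q => Q q.1))
          = List.map id (d.items.filter (fun q => Q q.1)) := by
        apply List.map_congr_left
        intro q hq
        have hQq : Q q.1 = true := (List.mem_filter.mp hq).2
        have hne : (q.1 == p.1) = false := by
          simp only [beq_eq_false_iff_ne]
          intro h0
          rw [h0, hQp] at hQq
          cases hQq
        simp [hne]
      rw [hmap, List.map_id]
    · have hc' : d.contains p.1 = false := by simpa using hc
      rw [PySem.Dict.items_insert_of_not_contains d p.2 hc']
      rw [List.filter_append]
      simp [hQp]

-- the first result of an update over ps that cannot find key k
lemma get?_update_of_not_mem :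
    ∀ (ps : List (String × Int)) (d : PySem.Dict String Int) (k : String),
    k ∉ ps.map Prod.fst → (d.update ps).get? k = d.get? k := by
  intro ps
  induction ps with
  | nil => intro d k _; rw [update_nil]
  | cons p rest ih =>
    intro d k hk
    rw [update_cons, ih _ k (fun h => hk (List.mem_cons_of_mem _ h))]
    exact PySem.Dict.get?_insert_of_ne d p.2 (fun h => hk (h ▸ List.mem_cons_self))

lemma get?_update_of_mem :
    ∀ (ps : List (String × Int)), (ps.map Prod.fst).Nodup →
    ∀ (d : PySem.Dict String Int) (k : String) (v : Int),
    (k, v) ∈ ps → (d.update ps).get? k = some v := by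
  intro ps
  induction ps with
  | nil => intro _ d k v h; cases h
  | cons p rest ih =>
    intro hnd d k v hmem
    rw [update_cons]
    rcases List.mem_cons.mp hmem with heq | hrest
    · have hk : k ∉ rest.map Prod.fst := by
        rw [show k = p.1 from congrArg Prod.fst heq]
        exact (List.nodup_cons.mp hnd).1
      rw [get?_update_of_not_mem rest _ k hk]
      rw [show p = (k, v) from heq.symm]
      exact PySem.Dict.get?_insert_self _ k v
    · exact ih (List.nodup_cons.mp hnd).2 _ k v hrest

-- ===== VERDICT (by name: the statement is the Claim_ definition above) =====
theorem add_dict_to_dict_spec : Claim_equal_add_dict_to_dict := by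
  intro dict_a dict_b _
  show add_dict_to_dict dict_a dict_b = add_dict_to_dict_alt dict_a dict_b
  simp only [add_dict_to_dict, add_dict_to_dict_alt]
  have hand : (PySem.Dict.ofList dict_a : PySem.Dict String Int).keys.Nodup :=
    PySem.Dict.nodup_keys_ofList dict_a
  have hbnd : (PySem.Dict.ofList dict_b : PySem.Dict String Int).keys.Nodup :=
    PySem.Dict.nodup_keys_ofList dict_b
  set da := (PySem.Dict.ofList dict_a : PySem.Dict String Int) with hda
  set db := (PySem.Dict.ofList dict_b : PySem.Dict String Int) with hdb
  set tmp := db.update da.items with htmp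
  -- A's loop, characterised
  rw [a_loop db db.keys hbnd da 0]
  -- B's merged dict, characterised
  have htmpnd : tmp.keys.Nodup := PySem.Dict.nodup_keys_update db da.items hbnd
  have hcons : ∀ p ∈ tmp.items, da.get? p.1 = some p.2 ∨ da.contains p.1 = false := by
    intro p hp
    by_cases hc : da.contains p.1 = true
    · left
      rw [PySem.Dict.contains_eq_isSome_get?] at hc
      obtain ⟨v, hv⟩ := Option.isSome_iff_exists.mp hc
      have hmem : (p.1, v) ∈ da.items := PySem.Dict.mem_items_of_get?_eq_some da hv
      have h1 : tmp.get? p.1 = some v :=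
        get?_update_of_mem da.items hand db p.1 v hmem
      have h2 : tmp.get? p.1 = some p.2 := PySem.Dict.get?_of_mem_items tmp hp htmpnd
      rw [hv, Option.some.injEq]
      exact (Option.some.inj (h2.symm.trans h1)).symm
    · exact Or.inr (by simpa using hc)
  have hmerged : (da.update tmp.items).items
      = da.items ++ tmp.items.filter (fun p => !da.contains p.1) :=
    update_items_of_consistent tmp.items htmpnd da hand hcons
  have hQfalse : ∀ p ∈ da.items, (!da.contains p.1) = false := by
    intro p hp
    rw [contains_of_mem_items da hp]
    rfl
  have hfil : tmp.items.filter (fun p => !da.contains p.1)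
      = db.items.filter (fun p => !da.contains p.1) :=
    filter_items_update (fun k => !da.contains k) da.items hQfalse db
  have hitems : db.items
      = db.keys.map (fun k => (k, db.getD k 0)) := PySem.Dict.items_eq_map_keys db hbnd 0
  have hnew : db.items.filter (fun p => !da.contains p.1)
      = (db.keys.filter (fun k => !da.contains k)).map (fun k => (k, db.getD k 0)) := by
    rw [hitems, List.filter_map]
    rfl
  have hold : db.items.filter (fun p => da.contains p.1)
      = (db.keys.filter (fun k => da.contains k)).map (fun k => (k, db.getD k 0)) := by
    rw [hitems, List.filter_map]
    rfl
  -- assemble the pair equality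
  refine Prod.ext ?_ ?_
  · show da.items ++ (db.keys.filter (fun k => !da.contains k)).map (fun k => (k, db.getD k 0))
        = (da.update tmp.items).items
    rw [hmerged, hfil, hnew]
  · show 0 + ((db.keys.filter (fun k => da.contains k)).length : Int)
        = (da.size : Int) + (db.size : Int) - ((da.update tmp.items).size : Int)
    have hsz : (da.update tmp.items).size
        = da.items.length + (db.items.filter (fun p => !da.contains p.1)).length := by
      show (da.update tmp.items).items.length = _
      rw [hmerged, hfil, List.length_append]
    have hsplit : db.items.length
        = (db.items.filter (fun p => da.contains p.1)).length
          + (db.items.filter (fun p => !da.contains p.1)).length :=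
      List.length_eq_length_filter_add (fun q : String × Int => da.contains q.1)
    have hlen : (db.items.filter (fun p => da.contains p.1)).length
        = (db.keys.filter (fun k => da.contains k)).length := by
      rw [hold, List.length_map]
    have hsa : da.size = da.items.length := rfl
    have hsb : db.size = db.items.length := rfl
    rw [hsz, hsa, hsb, ← hlen, hsplit]
    push_cast
    ring
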